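-- pv_equiv track=rewrite | github.com/nttlong/quicky-01 | packages/qmongo/helpers/validators.py | get_data_fields
-- ===== SOURCE A (Python) =====
-- def get_data_fields(data):
--     """
--     get all fields of data it serve for this file
--     :param data:
--     :return:
--     """
--     ret={}
--     field_with_typpe_list=[x for x in data.keys() if data[x]=="list"]
--
--     ignore_list=[]
--     for key in field_with_typpe_list:
--         ignore_list.extend([x for x in data.keys() if x.__len__()>key.__len__() and   x[0:key.__len__()+1]==key+"."])
--
--     for key in data.keys():
--         if data[key]=="list" :
--             ret.update({
--                 key:"list"
--                 })
--         elif ignore_list.count(key)==0: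
--             ret.update({
--                 key:data[key]
--                 })
--     return ret
-- ===== SOURCE B (Python) =====
-- def get_data_fields(data):
--     list_fields = {k for k, v in data.items() if v == "list"}
--
--     def blocked(key):
--         return any(key[:i] in list_fields for i, c in enumerate(key) if c == '.')
--
--     ret = {}
--     for key, val in data.items():
--         if key in list_fields:
--             ret[key] = "list"
--         elif not blocked(key):
--             ret[key] = val
--     return ret
-- ===== Notes on version B (the rewrite author's own statement) =====
-- stated objective: alternative
-- what changed: B drops A's precomputed ignore_list (built by scanning every key once per list-typed field) and instead builds a set of list-field names once, deciding each key's fate by testing its own dot-separated ancestor prefixes against that set in a single pass.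
import Mathlib
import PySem

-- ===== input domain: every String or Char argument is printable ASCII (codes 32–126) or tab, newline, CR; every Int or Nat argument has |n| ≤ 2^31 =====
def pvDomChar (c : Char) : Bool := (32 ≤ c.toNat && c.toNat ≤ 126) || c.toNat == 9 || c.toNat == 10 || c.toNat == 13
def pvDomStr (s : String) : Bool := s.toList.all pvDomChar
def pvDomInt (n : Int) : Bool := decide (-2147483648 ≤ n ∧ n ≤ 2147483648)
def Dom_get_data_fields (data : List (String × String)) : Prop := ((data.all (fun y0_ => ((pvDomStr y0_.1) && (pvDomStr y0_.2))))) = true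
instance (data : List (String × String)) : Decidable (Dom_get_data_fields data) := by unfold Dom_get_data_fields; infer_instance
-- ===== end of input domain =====

-- B replaces A's precomputed ignore_list (a scan of all keys per list-typed field) by a set of
-- list-field names and a per-key check of the key's own dot-ancestor prefixes; objective: alternative.
-- Pre_ restricts to association lists with distinct keys: the argument is a Python dict, which cannot
-- contain a duplicate key, so no input of A is excluded.


-- ===== PORT A =====
def get_data_fields (data : List (String × String)) : List (String × String) :=
  let d := PySem.Dict.mk data
  let field_with_typpe_list := d.keys.filter (fun x => d.getD x "" == "list")
  let ignore_list := field_with_typpe_list.foldl (fun acc key =>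
      acc ++ d.keys.filter (fun x =>
        decide (key.toList.length < x.toList.length) &&
        (PySem.List.slice x.toList (some 0) (some ((key.toList.length : Int) + 1)) == key.toList ++ ['.']))) []
  let ret := d.keys.foldl (fun (r : PySem.Dict String String) k =>
      if d.getD k "" == "list" then r.insert k "list"
      else if ignore_list.count k == 0 then r.insert k (d.getD k "") else r) PySem.Dict.empty
  ret.items

-- ===== PORT B =====
-- any(key[:i] in list_fields for i, c in enumerate(key) if c == '.')
def pvBlocked (list_fields : PySem.Set (List Char)) (key : String) : Bool :=
  (PySem.List.enumerate key.toList).any (fun p =>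
    p.2 == '.' && PySem.Set.contains list_fields (PySem.List.slice key.toList none (some p.1)))

def get_data_fields_alt (data : List (String × String)) : List (String × String) :=
  let items := (PySem.Dict.mk data).items
  let list_fields : PySem.Set (List Char) :=
    PySem.Set.ofList ((items.filter (fun p => p.2 == "list")).map (fun p => p.1.toList))
  let ret := items.foldl (fun (r : PySem.Dict String String) p =>
      if PySem.Set.contains list_fields p.1.toList then r.insert p.1 "list"
      else if pvBlocked list_fields p.1 then r
      else r.insert p.1 p.2) PySem.Dict.empty
  ret.items

-- ===== PRECONDITION & SPEC =====
-- Pre_ requires distinct keys: the Python argument is a dict, which cannot hold duplicate keys,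
-- so an association list with a repeated key corresponds to no input of A at all.
def Pre_get_data_fields (data : List (String × String)) : Prop := (data.map Prod.fst).Nodup
instance (data : List (String × String)) : Decidable (Pre_get_data_fields data) := by unfold Pre_get_data_fields; infer_instance
def pvWitness_get_data_fields : (List (String × String)) := [("a", "list"), ("a.b", "int"), ("c", "str")]
def Spec_get_data_fields (data : List (String × String)) (out : List (String × String)) : Prop := out = get_data_fields_alt data
instance (data : List (String × String)) (out : List (String × String)) : Decidable (Spec_get_data_fields data out) := by unfold Spec_get_data_fields; infer_instance

-- ===== CLAIM (what is proved, stated in full; the proofs are below) =====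
def Claim_equal_get_data_fields : Prop := ∀ (data : List (String × String)), Dom_get_data_fields data → Pre_get_data_fields data → Spec_get_data_fields data (get_data_fields data)

-- ===== LEMMAS AND PROOFS =====

-- the dot-boundary bridge: "x extends f by '.'" ↔ "f is the prefix of x cut at a dot position"
lemma dot_prefix_bridge (k f : List Char) :
    (f.length < k.length ∧ k.take (f.length + 1) = f ++ ['.']) ↔
    (∃ i : Nat, i < k.length ∧ k[i]? = some '.' ∧ k.take i = f) := by
  constructor
  · rintro ⟨hlt, htake⟩
    have hget : k[f.length]? = some (k[f.length]'hlt) := List.getElem?_eq_getElem hlt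
    have hsucc : k.take (f.length + 1) = k.take f.length ++ [k[f.length]'hlt] := by
      rw [List.take_add_one, hget]; rfl
    have hlen : (k.take f.length).length = f.length := by
      simp [List.length_take]; omega
    have := hsucc ▸ htake
    have hinj := List.append_inj' this (by simp)
    exact ⟨f.length, hlt, by rw [hget]; simpa using hinj.2, hinj.1⟩
  · rintro ⟨i, hi, hget, htake⟩
    have hlen : f.length = i := by rw [← htake]; simp [List.length_take]; omega
    have hc : k[i]'hi = '.' := by
      have := List.getElem?_eq_getElem hi ▸ hget; exact Option.some.inj this
    refine ⟨by omega, ?_⟩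
    rw [hlen, List.take_add_one, List.getElem?_eq_getElem hi, hc, ← htake]; rfl

-- membership in B's list_fields set, given distinct keys
lemma mem_list_fields (data : List (String × String)) (f : String) :
    (f.toList ∈ ((data.filter (fun q => q.2 == "list")).map (fun q => q.1.toList)) ↔
      (f, "list") ∈ data) := by
  constructor
  · intro h
    obtain ⟨q, hq, hf⟩ := List.mem_map.1 h
    have hq' := List.mem_filter.1 hq
    have : q.1 = f := by
      have : q.1.toList = f.toList := hf
      exact String.toList_inj.1 this
    have h2 : q.2 = "list" := by simpa using hq'.2
    have : q = (f, "list") := by cases q; simp_all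
    exact this ▸ hq'.1
  · intro h
    exact List.mem_map.2 ⟨(f, "list"), List.mem_filter.2 ⟨h, by simp⟩, rfl⟩

-- lookup on a nodup association list
lemma getD_mem (data : List (String × String)) (hnd : (data.map Prod.fst).Nodup)
    (p : String × String) (hp : p ∈ data) :
    (PySem.Dict.mk data).getD p.1 "" = p.2 := by
  have hk : (PySem.Dict.mk data).keys.Nodup := by
    simpa [PySem.Dict.keys, PySem.Dict.items] using hnd
  exact PySem.Dict.getD_of_mem_items (PySem.Dict.mk data) (k := p.1) (v := p.2) (by simpa using hp) hk ""

-- B's set test agrees with A's lookup test on members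
lemma contains_eq (data : List (String × String)) (hnd : (data.map Prod.fst).Nodup)
    (p : String × String) (hp : p ∈ data) :
    PySem.Set.contains
      (PySem.Set.ofList ((data.filter (fun q => q.2 == "list")).map (fun q => q.1.toList)))
      p.1.toList = (p.2 == "list") := by
  rcases h : (p.2 == "list") with _ | _
  · rw [Bool.eq_false_iff]
    intro hc
    have hm := (PySem.Set.mem_ofList _ _).1 ((PySem.Set.contains_iff _ _).1 hc)
    have hmem := (mem_list_fields data p.1).1 hm
    have heq : p = (p.1, "list") :=
      List.inj_on_of_nodup_map hnd hp hmem rfl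
    rw [heq] at h; simp at h
  · have hplist : (p.1, "list") ∈ data := by
      have : p = (p.1, "list") := by cases p; simp_all
      exact this ▸ hp
    have hm := (mem_list_fields data p.1).2 hplist
    exact (PySem.Set.contains_iff _ _).2 ((PySem.Set.mem_ofList _ _).2 hm)

-- x[0:n+1] on a list is take (n+1)
lemma slice_zero_succ (xs : List Char) (n : Nat) :
    PySem.List.slice xs (some 0) (some ((n : Int) + 1)) = xs.take (n + 1) := by
  have h := PySem.List.slice_natCast (xs := xs) (a := 0) (b := n + 1)
  push_cast at h
  simpa using h

-- A's ignore-list count is zero exactly when B's ancestor scan finds nothing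
lemma count_eq_blocked (data : List (String × String)) (hnd : (data.map Prod.fst).Nodup)
    (p : String × String) (hp : p ∈ data) :
    ((((data.map Prod.fst).filter (fun x => (PySem.Dict.mk data).getD x "" == "list")).foldl
        (fun acc key => acc ++ (data.map Prod.fst).filter (fun x =>
          decide (key.toList.length < x.toList.length) &&
          (PySem.List.slice x.toList (some 0) (some ((key.toList.length : Int) + 1)) == key.toList ++ ['.']))) []).count p.1) = 0
    ↔ pvBlocked
        (PySem.Set.ofList ((data.filter (fun q => q.2 == "list")).map (fun q => q.1.toList)))
        p.1 = false := by
  rw [List.count_eq_zero, PySem.List.foldl_append_eq_flatMap, List.nil_append, Bool.eq_false_iff]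
  apply not_congr
  constructor
  · intro hmem
    obtain ⟨f, hf, hpf⟩ := List.mem_flatMap.1 hmem
    obtain ⟨hf1, hf2⟩ := List.mem_filter.1 hf
    obtain ⟨q, hq, rfl⟩ := List.mem_map.1 hf1
    have hq2 : q.2 = "list" := by
      have hg := getD_mem data hnd q hq
      rw [hg] at hf2
      simpa using hf2
    have hqd : (q.1, "list") ∈ data := by
      have : q = (q.1, "list") := by cases q; simp_all
      exact this ▸ hq
    have hpcond := (List.mem_filter.1 hpf).2
    rw [Bool.and_eq_true] at hpcond
    have hlt : q.1.toList.length < p.1.toList.length := by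
      simpa using hpcond.1
    have hslice : p.1.toList.take (q.1.toList.length + 1) = q.1.toList ++ ['.'] := by
      have hs := beq_iff_eq.1 hpcond.2
      rw [slice_zero_succ] at hs
      exact hs
    obtain ⟨i, hi, hget, htake⟩ := (dot_prefix_bridge p.1.toList q.1.toList).1 ⟨hlt, hslice⟩
    unfold pvBlocked
    rw [List.any_eq_true]
    refine ⟨(0 + (i : Int), p.1.toList[i]'hi), ?_, ?_⟩
    · exact (PySem.List.mem_enumerate_iff _ _ _).2 ⟨i, hi, rfl⟩
    · have hc : p.1.toList[i]'hi = '.' :=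
        Option.some.inj ((List.getElem?_eq_getElem hi).symm.trans hget)
      rw [Bool.and_eq_true]
      refine ⟨by simp [hc], ?_⟩
      have hsl : PySem.List.slice p.1.toList none (some (0 + (i : Int))) = p.1.toList.take i := by
        rw [zero_add, PySem.List.slice_to_natCast]
      rw [hsl, htake]
      exact (PySem.Set.contains_iff _ _).2 ((PySem.Set.mem_ofList _ _).2 ((mem_list_fields data q.1).2 hqd))
  · intro hb
    unfold pvBlocked at hb
    rw [List.any_eq_true] at hb
    obtain ⟨pr, hpr, hcond⟩ := hb
    obtain ⟨i, hi, rfl⟩ := (PySem.List.mem_enumerate_iff _ _ _).1 hpr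
    rw [Bool.and_eq_true] at hcond
    have hdot : p.1.toList[i]'hi = '.' := by simpa using hcond.1
    have hsl : PySem.List.slice p.1.toList none (some (0 + (i : Int))) = p.1.toList.take i := by
      rw [zero_add, PySem.List.slice_to_natCast]
    have hmem' := (PySem.Set.mem_ofList _ _).1 ((PySem.Set.contains_iff _ _).1 (hsl ▸ hcond.2))
    obtain ⟨q, hqf, hqeq⟩ := List.mem_map.1 hmem'
    obtain ⟨hq, hq2⟩ := List.mem_filter.1 hqf
    have hqd : (q.1, "list") ∈ data := by
      have : q = (q.1, "list") := by cases q; simp_all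
      exact this ▸ hq
    obtain ⟨hlt, htake⟩ := (dot_prefix_bridge p.1.toList q.1.toList).2
      ⟨i, hi, by rw [List.getElem?_eq_getElem hi, hdot], hqeq.symm⟩
    refine List.mem_flatMap.2 ⟨q.1, ?_, ?_⟩
    · refine List.mem_filter.2 ⟨List.mem_map.2 ⟨q, hq, rfl⟩, ?_⟩
      have := getD_mem data hnd q hq
      rw [this]
      simpa using hq2
    · refine List.mem_filter.2 ⟨List.mem_map.2 ⟨p, hp, rfl⟩, ?_⟩
      rw [Bool.and_eq_true]
      refine ⟨by simpa using hlt, ?_⟩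
      rw [slice_zero_succ]
      exact beq_iff_eq.2 htake

-- ===== VERDICT (by name: the statement is the Claim_ definition above) =====
theorem get_data_fields_spec : Claim_equal_get_data_fields := by
  intro data _ hnd
  unfold Spec_get_data_fields
  simp only [get_data_fields, get_data_fields_alt]
  have hkeys : (PySem.Dict.mk data).keys = data.map Prod.fst := by
    simp [PySem.Dict.keys]
  congr 1
  conv_lhs => rw [hkeys, List.foldl_map]
  apply PySem.List.foldl_congr_mem'
  intro p hp r
  rw [getD_mem data hnd p hp, contains_eq data hnd p hp]
  rcases h : (p.2 == "list") with _ | _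
  · rcases hb : pvBlocked (PySem.Set.ofList ((data.filter (fun q => q.2 == "list")).map (fun q => q.1.toList))) p.1 with _ | _
    · have h0 := (count_eq_blocked data hnd p hp).2 hb
      have h1 : ((List.count p.1
          (List.foldl
            (fun acc key => acc ++
              List.filter (fun x =>
                decide (key.toList.length < x.toList.length) &&
                  PySem.List.slice x.toList (some 0) (some (↑key.toList.length + 1)) == key.toList ++ ['.'])
                (List.map Prod.fst data))
            [] (List.filter (fun x => (PySem.Dict.mk data).getD x "" == "list") (List.map Prod.fst data)))) == 0) = true := by
        simpa using h0
      rw [if_pos h1]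
      simp [hb]
    · have h0 : ¬ (((((data.map Prod.fst).filter (fun x => (PySem.Dict.mk data).getD x "" == "list")).foldl
          (fun acc key => acc ++ (data.map Prod.fst).filter (fun x =>
            decide (key.toList.length < x.toList.length) &&
            (PySem.List.slice x.toList (some 0) (some ((key.toList.length : Int) + 1)) == key.toList ++ ['.']))) []).count p.1) = 0) := by
        intro hc
        have := (count_eq_blocked data hnd p hp).1 hc
        rw [this] at hb
        exact Bool.false_ne_true hb
      have h1 : ¬ ((List.count p.1
          (List.foldl
            (fun acc key => acc ++
              List.filter (fun x =>
                decide (key.toList.length < x.toList.length) &&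
                  PySem.List.slice x.toList (some 0) (some (↑key.toList.length + 1)) == key.toList ++ ['.'])
                (List.map Prod.fst data))
            [] (List.filter (fun x => (PySem.Dict.mk data).getD x "" == "list") (List.map Prod.fst data)))) == 0) = true := by
        simpa using h0
      rw [if_neg h1]
      simp [hb]
  · simp
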